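-- pv_equiv track=rewrite | github.com/Erlis-Lushtaku/Projekti1-Rrjeta_ProgrammingWithSockets | TCPserver.py | ANASJELLTAS
-- ===== SOURCE A (Python) =====
-- def ANASJELLTAS(fjalet):
--     rezultati = ""
--     i = len(fjalet) - 1
--     while i >= 0:
--         rezultati += fjalet[i][::-1]
--         rezultati += " "
--         i = i - 1
--
--     return rezultati[:-1]
-- ===== SOURCE B (Python) =====
-- def ANASJELLTAS(fjalet):
--     return " ".join(fjalet)[::-1]
-- ===== Notes on version B (the rewrite author's own statement) =====
-- stated objective: faster
-- what changed: Replaces the backwards index loop that reverses each word, appends with += and strips a trailing space by a closed form: join all words with single spaces once and reverse the whole string once.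
import Mathlib
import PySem

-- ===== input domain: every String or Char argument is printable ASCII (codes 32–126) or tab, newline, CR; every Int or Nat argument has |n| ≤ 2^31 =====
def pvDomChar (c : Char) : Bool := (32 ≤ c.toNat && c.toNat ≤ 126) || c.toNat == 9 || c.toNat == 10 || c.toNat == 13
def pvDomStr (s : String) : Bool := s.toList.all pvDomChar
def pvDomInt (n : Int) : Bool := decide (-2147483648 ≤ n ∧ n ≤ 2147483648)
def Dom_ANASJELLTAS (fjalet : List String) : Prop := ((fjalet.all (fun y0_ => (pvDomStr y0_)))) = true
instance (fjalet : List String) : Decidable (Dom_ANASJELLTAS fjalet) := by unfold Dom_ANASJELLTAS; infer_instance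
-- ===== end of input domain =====

-- B replaces the backwards index loop with a closed form: join with spaces, reverse the whole string (objective: faster; a timing run measured B faster — A rebuilds the string with +=).

-- ===== PORT A =====
-- while loop 'i = len-1; while i >= 0: … ; i = i - 1' transcribed as recursion on the
-- fuel k = i + 1 (so the case k+1 runs the body at index i = k, and k = 0 means i < 0).
def ANASJELLTAS_loop (fjalet : List String) : Nat → String → String
  | 0, rezultati => rezultati
  | k + 1, rezultati =>
      -- rezultati += fjalet[i][::-1];  rezultati += " "
      ANASJELLTAS_loop fjalet k
        ((rezultati ++ (PySem.Str.slice? ((PySem.List.pyGet? fjalet (k : Int)).getD "") none none (-1)).getD "") ++ " ")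

def ANASJELLTAS (fjalet : List String) : String :=
  PySem.Str.slice (ANASJELLTAS_loop fjalet fjalet.length "") none (some (-1))

-- ===== PORT B =====
def ANASJELLTAS_alt (fjalet : List String) : String :=
  (PySem.Str.slice? (PySem.Str.join " " fjalet) none none (-1)).getD ""

-- ===== PRECONDITION & SPEC =====
def Spec_ANASJELLTAS (fjalet : List String) (out : String) : Prop := out = ANASJELLTAS_alt fjalet
instance (fjalet : List String) (out : String) : Decidable (Spec_ANASJELLTAS fjalet out) := by unfold Spec_ANASJELLTAS; infer_instance

-- ===== CLAIM (what is proved, stated in full; the proofs are below) =====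
def Claim_equal_ANASJELLTAS : Prop := ∀ (fjalet : List String), Dom_ANASJELLTAS fjalet → Spec_ANASJELLTAS fjalet (ANASJELLTAS fjalet)

-- ===== LEMMAS AND PROOFS =====

theorem joinSnoc (s x y : List Char) (xs : List (List Char)) :
    PySem.Chars.join s (x :: (xs ++ [y])) = PySem.Chars.join s (x :: xs) ++ s ++ y := by
  induction xs generalizing x with
  | nil => simp [PySem.Chars.join_cons_cons, PySem.Chars.join_singleton]
  | cons x' xs ih =>
      have h := ih x'
      simp only [List.cons_append] at h ⊢
      rw [PySem.Chars.join_cons_cons, PySem.Chars.join_cons_cons, h]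
      simp [List.append_assoc]

theorem loop_toList (fjalet : List String) (k : Nat) (hk : k ≤ fjalet.length) (rez : String) :
    (ANASJELLTAS_loop fjalet k rez).toList
      = rez.toList ++ ((PySem.Chars.join [' '] ((fjalet.take k).map String.toList)).reverse
          ++ if k = 0 then [] else [' ']) := by
  induction k generalizing rez with
  | zero => simp [ANASJELLTAS_loop, PySem.Chars.join_nil]
  | succ k ih =>
      have hklt : k < fjalet.length := hk
      obtain ⟨w, hw⟩ : ∃ w, fjalet[k]? = some w := ⟨fjalet[k], List.getElem?_eq_getElem hklt⟩
      have htake : fjalet.take (k + 1) = fjalet.take k ++ [w] := by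
        simp [List.take_add_one, hw]
      rw [ANASJELLTAS_loop, ih (Nat.le_of_lt hklt)]
      rw [PySem.List.pyGet?_natCast, hw]
      simp only [Option.getD_some, PySem.Str.slice?_none_none_neg_one, htake]
      rcases Nat.eq_zero_or_pos k with hk0 | hkpos
      · subst hk0
        simp [PySem.Chars.join_singleton, PySem.Chars.join_nil]
      · obtain ⟨x, xs, hx⟩ : ∃ x xs, fjalet.take k = x :: xs := by
          rcases h : fjalet.take k with _ | ⟨x, xs⟩
          · exfalso; have := congrArg List.length h; simp [Nat.min_eq_left (Nat.le_of_lt hklt)] at this; omega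
          · exact ⟨x, xs, rfl⟩
        simp only [hx, List.map_append, List.map_cons, List.map_nil, List.cons_append]
        rw [joinSnoc]
        simp [Nat.pos_iff_ne_zero.mp hkpos, List.append_assoc]

-- ===== VERDICT (by name: the statement is the Claim_ definition above) =====
theorem ANASJELLTAS_spec : Claim_equal_ANASJELLTAS := by
  unfold Claim_equal_ANASJELLTAS
  intro fjalet _
  unfold Spec_ANASJELLTAS ANASJELLTAS ANASJELLTAS_alt
  rcases fjalet with _ | ⟨w, ws⟩
  · decide
  · apply String.ext
    have hloop := loop_toList (w :: ws) (w :: ws).length (le_refl _) ""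
    simp only [List.take_length] at hloop
    have hA : (PySem.Str.slice (ANASJELLTAS_loop (w :: ws) (w :: ws).length "") none (some (-1))).toList
        = (ANASJELLTAS_loop (w :: ws) (w :: ws).length "").toList.dropLast :=
      PySem.Str.slice_to_neg_one _
    rw [hA, hloop]
    rw [PySem.Str.slice?_none_none_neg_one, Option.getD_some]
    simp [PySem.Str.toList_join]
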